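-- pv_equiv track=rewrite | github.com/rgrannell1/mirror | src/tags.py | tag_tree
-- ===== SOURCE A (Python) =====
-- def tag_tree(tree):
--   """Expand a tag-tree so that subsumptions can be easily accessed"""
--   expanded = {}
--
--   for parent_tag, children_tags in tree.items():
--     if parent_tag not in expanded:
--       expanded[parent_tag] = set()
--
--     for child_tag in children_tags:
--       if child_tag not in expanded:
--         expanded[child_tag] = set()
--
--       expanded[child_tag].add(parent_tag)
--
--   return expanded
-- ===== SOURCE B (Python) =====
-- def tag_tree(tree):
--   """Expand a tag-tree so that subsumptions can be easily accessed"""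
--   all_tags = dict.fromkeys(t for parent, children in tree.items()
--                              for t in (parent, *children))
--   return {tag: {parent for parent, children in tree.items() if tag in children}
--           for tag in all_tags}
-- ===== Notes on version B (the rewrite author's own statement) =====
-- stated objective: simpler
-- what changed: B first collects the full tag set (parents and children) in one comprehension, then builds the result as a dict comprehension where each tag's parent set comes from an independent scan of the whole tree, instead of A's single incremental pass that mutates a reverse index dict of sets.
import Mathlib
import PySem

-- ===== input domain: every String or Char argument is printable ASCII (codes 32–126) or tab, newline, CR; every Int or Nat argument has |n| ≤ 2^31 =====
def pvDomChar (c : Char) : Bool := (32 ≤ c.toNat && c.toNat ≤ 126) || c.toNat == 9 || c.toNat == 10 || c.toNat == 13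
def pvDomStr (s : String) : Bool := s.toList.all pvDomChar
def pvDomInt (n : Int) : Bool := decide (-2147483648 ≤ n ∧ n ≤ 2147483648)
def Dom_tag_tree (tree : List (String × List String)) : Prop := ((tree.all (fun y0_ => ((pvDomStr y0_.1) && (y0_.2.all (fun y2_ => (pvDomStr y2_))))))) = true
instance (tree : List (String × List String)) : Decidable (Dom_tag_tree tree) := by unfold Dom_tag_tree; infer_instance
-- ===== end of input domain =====

-- B computes the full tag set once, then each tag's parent set by an independent scan of the tree
-- (a per-tag repeated-scan comprehension), instead of A's single incremental reverse-index pass; simpler, not faster.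


-- ===== PORT A =====
-- inner loop: for child_tag in children_tags: ensure key, expanded[child_tag].add(parent_tag)
def tagTreeInner (p : String) (d : PySem.Dict String (PySem.Set String)) (c : String) :
    PySem.Dict String (PySem.Set String) :=
  let d := if d.contains c then d else d.insert c PySem.Set.empty
  d.modify c PySem.Set.empty (fun s => PySem.Set.add s p)

-- outer loop body: ensure parent key, then the inner loop over children
def tagTreeStep (d : PySem.Dict String (PySem.Set String)) (pc : String × List String) :
    PySem.Dict String (PySem.Set String) :=
  let d := if d.contains pc.1 then d else d.insert pc.1 PySem.Set.empty
  pc.2.foldl (tagTreeInner pc.1) d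

def tag_tree (tree : List (String × List String)) : List (String × List String) :=
  (tree.foldl tagTreeStep PySem.Dict.empty).items

-- ===== PORT B =====
def tag_tree_alt (tree : List (String × List String)) : List (String × List String) :=
  let allTags := PySem.List.dedup (tree.flatMap (fun pc => pc.1 :: pc.2))
  allTags.map (fun t =>
    (t, PySem.Set.ofList ((tree.filter (fun pc => pc.2.contains t)).map (·.1))))

-- ===== PRECONDITION & SPEC =====
def Spec_tag_tree (tree : List (String × List String)) (out : List (String × List String)) : Prop := out = tag_tree_alt tree
instance (tree : List (String × List String)) (out : List (String × List String)) : Decidable (Spec_tag_tree tree out) := by unfold Spec_tag_tree; infer_instance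

-- ===== CLAIM (what is proved, stated in full; the proofs are below) =====
def Claim_equal_tag_tree : Prop := ∀ (tree : List (String × List String)), Dom_tag_tree tree → Spec_tag_tree tree (tag_tree tree)

-- ===== LEMMAS AND PROOFS =====

theorem set_add_idem (s : PySem.Set String) (p : String) :
    PySem.Set.add (PySem.Set.add s p) p = PySem.Set.add s p := by
  by_cases h : p ∈ s
  · simp [PySem.Set.add, h]
  · simp [PySem.Set.add, h]

-- one inner-loop step changes getD only at the processed child
theorem inner_step_getD (p t c : String) (d : PySem.Dict String (PySem.Set String)) :
    (tagTreeInner p d c).getD t PySem.Set.empty =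
      if t = c then PySem.Set.add (d.getD t PySem.Set.empty) p
      else d.getD t PySem.Set.empty := by
  unfold tagTreeInner
  by_cases htc : t = c
  · subst htc
    by_cases hc : d.contains t
    · simp [hc, PySem.Dict.getD_modify]
    · simp [hc, PySem.Dict.getD_modify, PySem.Set.add,
        PySem.Dict.getD_of_not_contains d ([] : PySem.Set String) (by simpa using hc)]
  · by_cases hc : d.contains c
    · simp [hc, PySem.Dict.getD_modify, htc]
    · simp [hc, PySem.Dict.getD_modify, htc,
        PySem.Dict.getD_insert_of_ne d ([] : PySem.Set String) ([] : PySem.Set String) htc]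

-- getD at t through the inner loop over the children list
theorem inner_getD (p t : String) (cs : List String)
    (d : PySem.Dict String (PySem.Set String)) :
    (cs.foldl (tagTreeInner p) d).getD t PySem.Set.empty =
      if cs.contains t then PySem.Set.add (d.getD t PySem.Set.empty) p
      else d.getD t PySem.Set.empty := by
  induction cs generalizing d with
  | nil => simp
  | cons c cs ih =>
    rw [List.foldl_cons, ih, inner_step_getD]
    by_cases htc : t = c
    · subst htc
      by_cases hm : cs.contains t <;> simp [hm, set_add_idem]
    · have hne : (c == t) = false := by
        simpa using fun h => htc h.symm
      by_cases hm : cs.contains t <;>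
        simp [List.contains_cons, hm, htc, hne]

-- ensuring a key with an empty set does not change any getD (absent keys default to ∅)
theorem ensure_getD (t p : String) (d : PySem.Dict String (PySem.Set String)) :
    ((if d.contains p then d else d.insert p PySem.Set.empty)).getD t PySem.Set.empty
      = d.getD t PySem.Set.empty := by
  by_cases hp : d.contains p
  · simp [hp]
  · by_cases htp : t = p
    · subst htp
      simp [hp, PySem.Dict.getD_insert_self,
        PySem.Dict.getD_of_not_contains d ([] : PySem.Set String) (by simpa using hp)]
    · simp [hp, PySem.Dict.getD_insert_of_ne d ([] : PySem.Set String) ([] : PySem.Set String) htp]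

-- getD at t through the outer loop, accumulating the parents whose children contain t
theorem outer_getD (t : String) (tree : List (String × List String))
    (d : PySem.Dict String (PySem.Set String)) :
    (tree.foldl tagTreeStep d).getD t PySem.Set.empty =
      PySem.Set.update (d.getD t PySem.Set.empty)
        ((tree.filter (fun pc => pc.2.contains t)).map (·.1)) := by
  induction tree generalizing d with
  | nil => simp
  | cons pc tree ih =>
    obtain ⟨p, cs⟩ := pc
    simp only [List.foldl_cons]
    rw [ih]
    have hstep : (tagTreeStep d (p, cs)).getD t PySem.Set.empty =
        if cs.contains t then PySem.Set.add (d.getD t PySem.Set.empty) p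
        else d.getD t PySem.Set.empty := by
      unfold tagTreeStep
      rw [inner_getD, ensure_getD]
    rw [hstep]
    by_cases hm : cs.contains t
    · rw [if_pos hm, List.filter_cons_of_pos (by simpa using hm),
        List.map_cons, PySem.Set.update_cons]
    · rw [if_neg hm, List.filter_cons_of_neg (by simpa using hm)]

-- ensuring a key with an empty set adds it to the key set
theorem ensure_keys (p : String) (d : PySem.Dict String (PySem.Set String)) :
    ((if d.contains p then d else d.insert p PySem.Set.empty)).keys
      = PySem.Set.add d.keys p := by
  by_cases hp : d.contains p
  · have hmem : p ∈ d.keys := (PySem.Dict.contains_iff_mem_keys d p).mp hp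
    simp [hp, PySem.Set.add, hmem]
  · have hmem : p ∉ d.keys := fun h => hp ((PySem.Dict.contains_iff_mem_keys d p).mpr h)
    simp [hp, PySem.Dict.keys_insert_of_not_contains d ([] : PySem.Set String) (by simpa using hp),
      PySem.Set.add, hmem]

-- keys through the inner loop: Set.update with the children list
theorem inner_keys (p : String) (cs : List String)
    (d : PySem.Dict String (PySem.Set String)) :
    (cs.foldl (tagTreeInner p) d).keys = PySem.Set.update d.keys cs := by
  induction cs generalizing d with
  | nil => simp
  | cons c cs ih =>
    have hstep : (tagTreeInner p d c).keys = PySem.Set.add d.keys c := by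
      unfold tagTreeInner
      by_cases hc : d.contains c
      · have hmem : c ∈ d.keys := (PySem.Dict.contains_iff_mem_keys d c).mp hc
        rw [if_pos hc, PySem.Dict.keys_modify,
          PySem.Dict.keys_insert_of_contains d _ hc]
        simp [PySem.Set.add, hmem]
      · have hmem : c ∉ d.keys := fun h => hc ((PySem.Dict.contains_iff_mem_keys d c).mpr h)
        rw [if_neg hc, PySem.Dict.keys_modify, PySem.Dict.getD_insert_self,
          PySem.Dict.insert_insert_self,
          PySem.Dict.keys_insert_of_not_contains d _ (by simpa using hc)]
        simp [PySem.Set.add, hmem]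
    rw [List.foldl_cons, ih, hstep, PySem.Set.update_cons]

-- keys through the outer loop
theorem outer_keys (tree : List (String × List String))
    (d : PySem.Dict String (PySem.Set String)) :
    (tree.foldl tagTreeStep d).keys =
      tree.foldl (fun ks pc => PySem.Set.update ks (pc.1 :: pc.2)) d.keys := by
  induction tree generalizing d with
  | nil => simp
  | cons pc tree ih =>
    obtain ⟨p, cs⟩ := pc
    simp only [List.foldl_cons]
    rw [ih]
    congr 1
    unfold tagTreeStep
    rw [inner_keys, ensure_keys, PySem.Set.update_cons]

-- the key-accumulating fold is Set.update with the flattened tree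
theorem fold_update_flatMap (tree : List (String × List String)) (ks : PySem.Set String) :
    tree.foldl (fun ks pc => PySem.Set.update ks (pc.1 :: pc.2)) ks =
      PySem.Set.update ks (tree.flatMap (fun pc => pc.1 :: pc.2)) := by
  induction tree generalizing ks with
  | nil => simp
  | cons pc tree ih =>
    rw [List.foldl_cons, ih, List.flatMap_cons, PySem.Set.update_append]

theorem final_keys (tree : List (String × List String)) :
    (tree.foldl tagTreeStep PySem.Dict.empty).keys =
      PySem.List.dedup (tree.flatMap (fun pc => pc.1 :: pc.2)) := by
  rw [outer_keys, fold_update_flatMap, PySem.Dict.keys_empty,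
    PySem.Set.update_nil_left, PySem.List.dedup_eq_ofList]

-- ===== VERDICT (by name: the statement is the Claim_ definition above) =====
theorem tag_tree_spec : Claim_equal_tag_tree := by
  intro tree _
  unfold Spec_tag_tree tag_tree tag_tree_alt
  have hnd : (tree.foldl tagTreeStep PySem.Dict.empty).keys.Nodup := by
    rw [final_keys]; exact PySem.List.nodup_dedup _
  rw [PySem.Dict.items_eq_map_keys _ hnd PySem.Set.empty, final_keys]
  refine List.map_congr_left (fun t ht => ?_)
  rw [outer_getD, PySem.Dict.getD_empty, PySem.Set.update_empty]
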